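-- pv_equiv track=rewrite | github.com/DMoyaR/trabajo_titulo | backend/api/views.py | _expandir_tokens_equivalentes
-- ===== SOURCE A (Python) =====
-- _CARRERA_EQUIVALENCIAS = [
--     {"computacion", "informatica"},
--     {"industrial", "industria"},
-- ]
--
-- def _expandir_tokens_equivalentes(tokens: set[str]) -> set[str]:
--     if not tokens:
--         return set()
--
--     resultado = set(tokens)
--     for grupo in _CARRERA_EQUIVALENCIAS:
--         if resultado & grupo:
--             resultado |= grupo
--     return resultado
-- ===== SOURCE B (Python) =====
-- _CARRERA_EQUIVALENCIAS = [
--     {"computacion", "informatica"},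
--     {"industrial", "industria"},
-- ]
--
-- # token -> index of its equivalence group, built once at module load
-- _EQUIV_INDICE = {tok: i for i, grupo in enumerate(_CARRERA_EQUIVALENCIAS) for tok in grupo}
--
-- def _expandir_tokens_equivalentes(tokens: set[str]) -> set[str]:
--     if not tokens:
--         return set()
--
--     activados = {_EQUIV_INDICE[t] for t in tokens if t in _EQUIV_INDICE}
--     resultado = set(tokens)
--     for i in sorted(activados):
--         resultado |= _CARRERA_EQUIVALENCIAS[i]
--     return resultado
-- ===== Notes on version B (the rewrite author's own statement) =====
-- stated objective: alternative
-- what changed: A scans the fixed group list and tests each group by set intersection against the growing result; B precomputes a module-level token-to-group-index dict, collects the triggered group indices in one pass over the input tokens, and unions just those groups in.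
import Mathlib
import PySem

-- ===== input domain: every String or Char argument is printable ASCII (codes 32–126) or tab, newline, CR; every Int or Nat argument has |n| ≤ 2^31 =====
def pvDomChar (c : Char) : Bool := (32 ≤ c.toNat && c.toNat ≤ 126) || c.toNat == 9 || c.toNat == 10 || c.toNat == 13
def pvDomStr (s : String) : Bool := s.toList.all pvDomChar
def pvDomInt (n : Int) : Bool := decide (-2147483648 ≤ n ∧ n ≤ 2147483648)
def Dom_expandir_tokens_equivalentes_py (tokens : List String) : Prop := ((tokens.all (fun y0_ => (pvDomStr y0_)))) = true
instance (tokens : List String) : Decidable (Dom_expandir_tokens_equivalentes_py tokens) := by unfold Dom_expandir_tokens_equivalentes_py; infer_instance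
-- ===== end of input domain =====

-- ===== PORT A =====
-- B replaces the per-group intersection scan by a precomputed token->group-index dict and a single pass over the tokens (alternative; return-value equivalence).
-- _CARRERA_EQUIVALENCIAS: list of equivalence groups (Python sets, ported as their literal element lists)
def pvGrupos : List (List String) := [["computacion", "informatica"], ["industrial", "industria"]]

def expandir_tokens_equivalentes_py (tokens : List String) : List String :=
  if tokens.isEmpty then []
  else
    pvGrupos.foldl
      (fun resultado grupo =>
        if PySem.Set.inter resultado grupo ≠ [] then PySem.Set.union resultado grupo
        else resultado)
      (PySem.Set.ofList tokens)

-- ===== PORT B =====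
-- _EQUIV_INDICE = {tok: i for i, grupo in enumerate(_CARRERA_EQUIVALENCIAS) for tok in grupo}
def pvEquivIndice : PySem.Dict String Int :=
  (PySem.List.enumerate pvGrupos).foldl
    (fun d p => p.2.foldl (fun d tok => PySem.Dict.insert d tok p.1) d) PySem.Dict.empty

def expandir_tokens_equivalentes_py_alt (tokens : List String) : List String :=
  if tokens.isEmpty then []
  else
    -- activados = {_EQUIV_INDICE[t] for t in tokens if t in _EQUIV_INDICE}
    let activados : PySem.Set Int :=
      tokens.foldl
        (fun s t =>
          match PySem.Dict.get? pvEquivIndice t with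
          | some i => PySem.Set.add s i
          | none => s)
        PySem.Set.empty
    -- for i in sorted(activados): resultado |= _CARRERA_EQUIVALENCIAS[i]
    -- (the .getD [] default never fires: every value stored in _EQUIV_INDICE is a valid index)
    (PySem.List.sorted activados (fun x => x)).foldl
      (fun resultado i => PySem.Set.union resultado ((PySem.List.pyGet? pvGrupos i).getD []))
      (PySem.Set.ofList tokens)

-- ===== PRECONDITION & SPEC =====\n
def Spec_expandir_tokens_equivalentes_py (tokens : List String) (out : List String) : Prop := out = expandir_tokens_equivalentes_py_alt tokens
instance (tokens : List String) (out : List String) : Decidable (Spec_expandir_tokens_equivalentes_py tokens out) := by unfold Spec_expandir_tokens_equivalentes_py; infer_instance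

-- ===== CLAIM (what is proved, stated in full; the proofs are below) =====
def Claim_equal_expandir_tokens_equivalentes_py : Prop := ∀ (tokens : List String), Dom_expandir_tokens_equivalentes_py tokens → Spec_expandir_tokens_equivalentes_py tokens (expandir_tokens_equivalentes_py tokens)

-- ===== LEMMAS AND PROOFS =====

-- the module-level dict, looked up on an arbitrary key
theorem get?_pvEquivIndice (t : String) :
    PySem.Dict.get? pvEquivIndice t =
      if t = "computacion" then some 0 else if t = "informatica" then some 0
      else if t = "industrial" then some 1 else if t = "industria" then some 1 else none := by
  have h : pvEquivIndice.items =
      [("computacion", 0), ("informatica", 0), ("industrial", 1), ("industria", 1)] := by decide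
  simp only [PySem.Dict.get?, h, List.find?]
  split_ifs with h1 h2 h3 h4 <;> subst_eqs
  · rfl
  · rfl
  · rfl
  · rfl
  · have e1 : ("computacion" == t) = false := beq_eq_false_iff_ne.mpr fun e => h1 e.symm
    have e2 : ("informatica" == t) = false := beq_eq_false_iff_ne.mpr fun e => h2 e.symm
    have e3 : ("industrial" == t) = false := beq_eq_false_iff_ne.mpr fun e => h3 e.symm
    have e4 : ("industria" == t) = false := beq_eq_false_iff_ne.mpr fun e => h4 e.symm
    simp [e1, e2, e3, e4]

-- membership in the fold that builds `activados`
theorem mem_activados (tokens : List String) (s : PySem.Set Int) (i : Int) :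
    i ∈ tokens.foldl
        (fun s t =>
          match PySem.Dict.get? pvEquivIndice t with
          | some j => PySem.Set.add s j
          | none => s) s ↔
      i ∈ s ∨ ∃ t ∈ tokens, PySem.Dict.get? pvEquivIndice t = some i := by
  induction tokens generalizing s with
  | nil => simp
  | cons x xs ih =>
    simp only [List.foldl_cons, ih]
    cases h : PySem.Dict.get? pvEquivIndice x <;>
      simp_all [PySem.Set.mem_add] <;> tauto

-- the fold that builds `activados` preserves Nodup
theorem nodup_activados (tokens : List String) (s : PySem.Set Int) (hs : s.Nodup) :
    (tokens.foldl
        (fun s t =>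
          match PySem.Dict.get? pvEquivIndice t with
          | some j => PySem.Set.add s j
          | none => s) s).Nodup := by
  induction tokens generalizing s with
  | nil => exact hs
  | cons x xs ih =>
    simp only [List.foldl_cons]
    cases h : PySem.Dict.get? pvEquivIndice x <;> simp [h]
    · exact ih s hs
    · exact ih _ (PySem.Set.nodup_add _ _ hs)

-- `resultado & grupo` is nonempty iff some element of resultado lies in grupo
theorem inter_ne_nil (s t : List String) :
    (PySem.Set.inter s t ≠ []) ↔ ∃ x ∈ s, x ∈ t := by
  simp only [PySem.Set.inter, ne_eq, List.filter_eq_nil_iff]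
  push_neg
  simp [PySem.Set.contains_iff]

theorem exists_mem_pair (s : List String) (a b : String) :
    (∃ x ∈ s, x ∈ [a, b]) ↔ a ∈ s ∨ b ∈ s := by
  constructor
  · rintro ⟨x, hx, hab⟩
    rcases List.mem_pair.mp hab with rfl | rfl
    · exact Or.inl hx
    · exact Or.inr hx
  · rintro (h | h)
    · exact ⟨a, h, by simp⟩
    · exact ⟨b, h, by simp⟩

-- A's loop condition for a group at the start
theorem cond_ofList (tokens : List String) (a b : String) :
    ((PySem.Set.ofList tokens).inter [a, b] ≠ []) ↔ (a ∈ tokens ∨ b ∈ tokens) := by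
  rw [inter_ne_nil, exists_mem_pair]
  simp [PySem.Set.mem_ofList]

-- A's loop condition for the second group after the first was merged in (the groups are disjoint)
theorem cond_union (tokens : List String) :
    ((PySem.Set.union (PySem.Set.ofList tokens) ["computacion", "informatica"]).inter
        ["industrial", "industria"] ≠ []) ↔
      ("industrial" ∈ tokens ∨ "industria" ∈ tokens) := by
  rw [inter_ne_nil, exists_mem_pair]
  simp only [PySem.Set.mem_union, PySem.Set.mem_ofList]
  constructor
  · rintro ((h | h) | (h | h))
    · exact Or.inl h
    · exact absurd h (by decide)
    · exact Or.inr h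
    · exact absurd h (by decide)
  · rintro (h | h)
    · exact Or.inl (Or.inl h)
    · exact Or.inr (Or.inl h)

-- which group indices the tokens hit
theorem exists_get?_iff (tokens : List String) (i : Int) :
    (∃ t ∈ tokens, PySem.Dict.get? pvEquivIndice t = some i) ↔
      ((i = 0 ∧ ("computacion" ∈ tokens ∨ "informatica" ∈ tokens)) ∨
        (i = 1 ∧ ("industrial" ∈ tokens ∨ "industria" ∈ tokens))) := by
  constructor
  · rintro ⟨t, ht, hg⟩
    rw [get?_pvEquivIndice] at hg
    split_ifs at hg with h1 h2 h3 h4 <;> subst_eqs <;> simp_all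
  · rintro (⟨rfl, h | h⟩ | ⟨rfl, h | h⟩) <;>
      exact ⟨_, h, by rw [get?_pvEquivIndice]; decide⟩

-- ===== VERDICT =====
theorem expandir_tokens_equivalentes_py_spec : Claim_equal_expandir_tokens_equivalentes_py := by
  intro tokens _
  unfold Spec_expandir_tokens_equivalentes_py
  unfold expandir_tokens_equivalentes_py expandir_tokens_equivalentes_py_alt
  by_cases hE : tokens.isEmpty
  · simp [hE]
  · simp only [hE, Bool.false_eq_true, if_false, pvGrupos, List.foldl_cons, List.foldl_nil]
    have hnd : (tokens.foldl
        (fun s t =>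
          match PySem.Dict.get? pvEquivIndice t with
          | some j => PySem.Set.add s j
          | none => s) PySem.Set.empty).Nodup :=
      nodup_activados tokens PySem.Set.empty (by simp [PySem.Set.empty])
    have hmem : ∀ i : Int,
        i ∈ tokens.foldl
            (fun s t =>
              match PySem.Dict.get? pvEquivIndice t with
              | some j => PySem.Set.add s j
              | none => s) PySem.Set.empty ↔
          ((i = 0 ∧ ("computacion" ∈ tokens ∨ "informatica" ∈ tokens)) ∨
            (i = 1 ∧ ("industrial" ∈ tokens ∨ "industria" ∈ tokens))) := by
      intro i
      rw [mem_activados, exists_get?_iff]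
      simp [PySem.Set.empty]
    have hg0 : (PySem.List.pyGet? [["computacion", "informatica"], ["industrial", "industria"]]
        (0 : Int)).getD [] = ["computacion", "informatica"] := by decide
    have hg1 : (PySem.List.pyGet? [["computacion", "informatica"], ["industrial", "industria"]]
        (1 : Int)).getD [] = ["industrial", "industria"] := by decide
    by_cases hb0 : "computacion" ∈ tokens ∨ "informatica" ∈ tokens <;>
      by_cases hb1 : "industrial" ∈ tokens ∨ "industria" ∈ tokens
    · have hperm : (tokens.foldl
          (fun s t =>
            match PySem.Dict.get? pvEquivIndice t with
            | some j => PySem.Set.add s j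
            | none => s) PySem.Set.empty).Perm ([0, 1] : List Int) :=
        (List.perm_ext_iff_of_nodup hnd (by decide)).mpr
          (fun i => by rw [hmem]; simp [hb0, hb1])
      rw [PySem.List.sorted_eq_sorted_of_perm _ [0, 1] _ (fun a b h => h) hperm,
        PySem.List.sorted_eq_self_of_pairwise _ _ (by decide)]
      have c0 := (cond_ofList tokens "computacion" "informatica").mpr hb0
      have c1 := (cond_union tokens).mpr hb1
      simp only [List.foldl_cons, List.foldl_nil, hg0, hg1, if_pos c0, if_pos c1]
    · have hperm : (tokens.foldl
          (fun s t =>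
            match PySem.Dict.get? pvEquivIndice t with
            | some j => PySem.Set.add s j
            | none => s) PySem.Set.empty).Perm ([0] : List Int) :=
        (List.perm_ext_iff_of_nodup hnd (by decide)).mpr
          (fun i => by rw [hmem]; simp [hb0, hb1])
      rw [PySem.List.sorted_eq_sorted_of_perm _ [0] _ (fun a b h => h) hperm,
        PySem.List.sorted_eq_self_of_pairwise _ _ (by decide)]
      have c0 := (cond_ofList tokens "computacion" "informatica").mpr hb0
      have c1 : ¬ ((PySem.Set.union (PySem.Set.ofList tokens)
          ["computacion", "informatica"]).inter ["industrial", "industria"] ≠ []) :=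
        fun h => hb1 ((cond_union tokens).mp h)
      simp only [List.foldl_cons, List.foldl_nil, hg0, if_pos c0, if_neg c1]
    · have hperm : (tokens.foldl
          (fun s t =>
            match PySem.Dict.get? pvEquivIndice t with
            | some j => PySem.Set.add s j
            | none => s) PySem.Set.empty).Perm ([1] : List Int) :=
        (List.perm_ext_iff_of_nodup hnd (by decide)).mpr
          (fun i => by rw [hmem]; simp [hb0, hb1])
      rw [PySem.List.sorted_eq_sorted_of_perm _ [1] _ (fun a b h => h) hperm,
        PySem.List.sorted_eq_self_of_pairwise _ _ (by decide)]
      have c0 : ¬ ((PySem.Set.ofList tokens).inter ["computacion", "informatica"] ≠ []) :=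
        fun h => hb0 ((cond_ofList tokens "computacion" "informatica").mp h)
      have c1 := (cond_ofList tokens "industrial" "industria").mpr hb1
      simp only [List.foldl_cons, List.foldl_nil, hg1, if_pos c1, if_neg c0]
    · have hperm : (tokens.foldl
          (fun s t =>
            match PySem.Dict.get? pvEquivIndice t with
            | some j => PySem.Set.add s j
            | none => s) PySem.Set.empty).Perm ([] : List Int) :=
        (List.perm_ext_iff_of_nodup hnd (by decide)).mpr
          (fun i => by rw [hmem]; simp [hb0, hb1])
      rw [PySem.List.sorted_eq_sorted_of_perm _ [] _ (fun a b h => h) hperm,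
        PySem.List.sorted_eq_self_of_pairwise _ _ (by decide)]
      have c0 : ¬ ((PySem.Set.ofList tokens).inter ["computacion", "informatica"] ≠ []) :=
        fun h => hb0 ((cond_ofList tokens "computacion" "informatica").mp h)
      have c1 : ¬ ((PySem.Set.ofList tokens).inter ["industrial", "industria"] ≠ []) :=
        fun h => hb1 ((cond_ofList tokens "industrial" "industria").mp h)
      simp only [List.foldl_nil, if_neg c0, if_neg c1]
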